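-- pv_equiv track=rewrite | github.com/nirajanDevHub108/PythonDSA | DATASTRUCTURE/ARRAY/returnUnique.py | returnUniqueElemnt
-- ===== SOURCE A (Python) =====
-- def returnUniqueElemnt(arr,k):
--         n=len(arr)
--         ans=0
--         max_num=max(arr)
--         max_bit=max_num.bit_length()
--         for bit in range(max_bit):
--             count=0
--             for num in arr:
--                 if (num >> bit) &1:
--                     count+=1
--             if count % k != 0:
--                 ans |=(1<<bit)
--
--         return ans
-- ===== SOURCE B (Python) =====
-- def returnUniqueElemnt(arr, k):
--     # Encode per-bit counts as digits of one big integer in base len(arr)+1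
--     # (digits cannot carry since each count <= len(arr)), then decode digit by digit.
--     mb = max(arr).bit_length()
--     base = len(arr) + 1
--     total = 0
--     for num in arr:
--         w = 1
--         for bit in range(mb):
--             total += ((num >> bit) & 1) * w
--             w *= base
--     ans = 0
--     for bit in range(mb):
--         total, d = divmod(total, base)
--         if d % k != 0:
--             ans |= 1 << bit
--     return ans
-- ===== Notes on version B (the rewrite author's own statement) =====
-- stated objective: alternative
-- what changed: B encodes all per-bit counts as digits of a single big integer in base len(arr)+1 (no carries since each digit <= len(arr)) in one accumulation pass, then decodes the digits with divmod to emit the answer bits, replacing A's per-bit rescans of the array.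
import Mathlib
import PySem

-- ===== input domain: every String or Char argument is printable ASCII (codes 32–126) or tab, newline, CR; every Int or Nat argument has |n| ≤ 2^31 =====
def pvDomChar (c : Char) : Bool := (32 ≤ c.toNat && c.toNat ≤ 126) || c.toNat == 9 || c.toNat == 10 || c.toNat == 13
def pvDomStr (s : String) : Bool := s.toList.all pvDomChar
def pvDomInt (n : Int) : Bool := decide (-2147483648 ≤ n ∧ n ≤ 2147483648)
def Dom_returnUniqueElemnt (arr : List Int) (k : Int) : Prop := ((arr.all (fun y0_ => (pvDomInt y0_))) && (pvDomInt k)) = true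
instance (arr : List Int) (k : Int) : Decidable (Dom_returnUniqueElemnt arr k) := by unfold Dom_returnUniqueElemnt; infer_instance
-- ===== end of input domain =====

-- B encodes the per-bit counts as the digits of one big integer in base len(arr)+1 (digits never
-- carry since each count ≤ len(arr)) in a single accumulation pass, then decodes digit by digit
-- with divmod, instead of A's rescan of the whole array for every bit (alternative algorithm).

-- ===== PORT A =====
def returnUniqueElemnt (arr : List Int) (k : Int) : Int :=
  match PySem.List.max? arr (fun x => x) with
  | none => 0  -- unreachable under Pre_ (Python raises ValueError on max([]))
  | some maxNum =>
    let maxBit := PySem.Int.bitLength maxNum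
    (List.range maxBit).foldl (fun ans (bit : Nat) =>
      let count := arr.foldl (fun count (num : Int) =>
        if PySem.Int.band (num >>> bit) 1 ≠ 0 then count + 1 else count) (0 : Int)
      if PySem.Int.mod count k ≠ 0 then PySem.Int.bor ans ((1 : Int) <<< bit) else ans) 0

-- ===== PORT B =====
def returnUniqueElemnt_alt (arr : List Int) (k : Int) : Int :=
  match PySem.List.max? arr (fun x => x) with
  | none => 0  -- unreachable under Pre_ (Python raises ValueError on max([]))
  | some maxNum =>
    let mb := PySem.Int.bitLength maxNum
    let base : Int := (arr.length : Int) + 1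
    let total := arr.foldl (fun (total : Int) (num : Int) =>
      ((List.range mb).foldl (fun (p : Int × Int) (bit : Nat) =>
          (p.1 + PySem.Int.band (num >>> bit) 1 * p.2, p.2 * base)) (total, 1)).1) 0
    ((List.range mb).foldl (fun (p : Int × Int) (bit : Nat) =>
        (PySem.Int.floordiv p.1 base,
         if PySem.Int.mod (PySem.Int.mod p.1 base) k ≠ 0
         then PySem.Int.bor p.2 ((1 : Int) <<< bit) else p.2))
      (total, 0)).2

-- ===== PRECONDITION & SPEC =====
-- Pre_ excludes exactly the inputs where A raises: max([]) is a ValueError, and k = 0 a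
-- ZeroDivisionError unless max(arr).bit_length() = 0 (i.e. max(arr) = 0), where no division runs.
def Pre_returnUniqueElemnt (arr : List Int) (k : Int) : Prop :=
  arr ≠ [] ∧ (k ≠ 0 ∨ PySem.List.max? arr (fun x => x) = some 0)
instance (arr : List Int) (k : Int) : Decidable (Pre_returnUniqueElemnt arr k) := by
  unfold Pre_returnUniqueElemnt; infer_instance

def pvWitness_returnUniqueElemnt : List Int × Int := ([5, 5, 5, 7], 3)

def Spec_returnUniqueElemnt (arr : List Int) (k : Int) (out : Int) : Prop := out = returnUniqueElemnt_alt arr k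
instance (arr : List Int) (k : Int) (out : Int) : Decidable (Spec_returnUniqueElemnt arr k out) := by unfold Spec_returnUniqueElemnt; infer_instance

-- ===== CLAIM (what is proved, stated in full; the proofs are below) =====
def Claim_equal_returnUniqueElemnt : Prop := ∀ (arr : List Int) (k : Int), Dom_returnUniqueElemnt arr k → Pre_returnUniqueElemnt arr k → Spec_returnUniqueElemnt arr k (returnUniqueElemnt arr k)

-- ===== LEMMAS AND PROOFS =====

-- A's if-increment count of set bits equals the sum of the 0/1 bit values
theorem count_fold_eq_sum (arr : List Int) (bit : Nat) :
    arr.foldl (fun count (num : Int) =>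
        if PySem.Int.band (num >>> bit) 1 ≠ 0 then count + 1 else count) (0 : Int)
      = (arr.map (fun (num : Int) => PySem.Int.band (num >>> bit) 1)).sum := by
  suffices h : ∀ c : Int, arr.foldl (fun count (num : Int) =>
      if PySem.Int.band (num >>> bit) 1 ≠ 0 then count + 1 else count) c
      = c + (arr.map (fun (num : Int) => PySem.Int.band (num >>> bit) 1)).sum by
    simpa using h 0
  induction arr with
  | nil => intro c; simp
  | cons x t ih =>
    intro c
    have hx : PySem.Int.band (x >>> bit) 1 = 0 ∨ PySem.Int.band (x >>> bit) 1 = 1 := by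
      rw [PySem.Int.band_one, PySem.Int.mod_eq_emod_of_pos (by norm_num)]
      omega
    simp only [List.foldl_cons, List.map_cons, List.sum_cons, ih]
    rcases hx with h | h
    · simp [h]
    · simp [h]; ring

-- each 0/1 bit value is bounded
theorem bitv_bounds (num : Int) (bit : Nat) :
    0 ≤ PySem.Int.band (num >>> bit) 1 ∧ PySem.Int.band (num >>> bit) 1 ≤ 1 := by
  rw [PySem.Int.band_one, PySem.Int.mod_eq_emod_of_pos (by norm_num)]
  omega

-- the per-bit count (a sum of 0/1 values) lies between 0 and the array length
theorem digit_bounds (arr : List Int) (bit : Nat) :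
    0 ≤ (arr.map (fun (num : Int) => PySem.Int.band (num >>> bit) 1)).sum ∧
      (arr.map (fun (num : Int) => PySem.Int.band (num >>> bit) 1)).sum ≤ (arr.length : Int) := by
  induction arr with
  | nil => simp
  | cons x t ih =>
    have hx := bitv_bounds x bit
    simp only [List.map_cons, List.sum_cons, List.length_cons]
    push_cast
    omega

-- B's inner loop adds the base-`base` encoding of num's low mb bits
theorem encode_inner (mb : Nat) (base : Int) (num : Int) (t w : Int) :
    (List.range mb).foldl (fun (p : Int × Int) (bit : Nat) =>
        (p.1 + PySem.Int.band (num >>> bit) 1 * p.2, p.2 * base)) (t, w)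
      = (t + w * ((List.range mb).map
            (fun (i : Nat) => PySem.Int.band (num >>> i) 1 * base ^ i)).sum,
         w * base ^ mb) := by
  induction mb with
  | zero => simp
  | succ m ih =>
    rw [List.range_succ, List.foldl_append, ih, List.map_append]
    simp only [List.foldl_cons, List.foldl_nil, List.map_cons, List.map_nil,
      List.sum_append, List.sum_cons, List.sum_nil]
    rw [Prod.mk.injEq]
    constructor <;> ring

-- B's outer loop totals the encodings of all elements
theorem encode_outer (arr : List Int) (mb : Nat) (base : Int) (c : Int) :
    arr.foldl (fun (total : Int) (num : Int) =>
        ((List.range mb).foldl (fun (p : Int × Int) (bit : Nat) =>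
            (p.1 + PySem.Int.band (num >>> bit) 1 * p.2, p.2 * base)) (total, 1)).1) c
      = c + (arr.map (fun (num : Int) => ((List.range mb).map
            (fun (i : Nat) => PySem.Int.band (num >>> i) 1 * base ^ i)).sum)).sum := by
  simp only [encode_inner, one_mul]
  exact PySem.List.foldl_add arr _ c

-- double-sum exchange: summing encodings element-first equals digit-first
theorem sum_swap (arr : List Int) (mb : Nat) (base : Int) :
    (arr.map (fun (num : Int) => ((List.range mb).map
        (fun (i : Nat) => PySem.Int.band (num >>> i) 1 * base ^ i)).sum)).sum
      = ((List.range mb).map (fun (i : Nat) =>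
          (arr.map (fun (num : Int) => PySem.Int.band (num >>> i) 1)).sum * base ^ i)).sum := by
  induction arr with
  | nil => simp
  | cons x t ih =>
    simp only [List.map_cons, List.sum_cons, ih]
    rw [← PySem.List.sum_map_add_int]
    exact congrArg List.sum (List.map_congr_left fun i _ => by ring)

-- decoding: stripping digits with divmod recovers them in order (digits d (off+i), i < m)
theorem decode_fold (k base : Int) (hbase : 0 < base) :
    ∀ (m off : Nat) (d : Nat → Int) (a t : Int),
      (∀ i, i < m → 0 ≤ d (off + i) ∧ d (off + i) < base) →
      t = ((List.range m).map (fun (i : Nat) => d (off + i) * base ^ i)).sum →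
      (((List.range m).map (· + off)).foldl (fun (p : Int × Int) (bit : Nat) =>
          (PySem.Int.floordiv p.1 base,
           if PySem.Int.mod (PySem.Int.mod p.1 base) k ≠ 0
           then PySem.Int.bor p.2 ((1 : Int) <<< bit) else p.2)) (t, a)).2
        = ((List.range m).map (· + off)).foldl (fun (a : Int) (bit : Nat) =>
            if PySem.Int.mod (d bit) k ≠ 0
            then PySem.Int.bor a ((1 : Int) <<< bit) else a) a := by
  intro m
  induction m with
  | zero => intro off d a t _ _; simp
  | succ m ih =>
    intro off d a t hb ht
    have hrest : t = d off + base * ((List.range m).map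
        (fun (i : Nat) => d (off + 1 + i) * base ^ i)).sum := by
      rw [ht, List.range_succ_eq_map, List.map_cons, List.sum_cons, List.map_map,
        ← List.sum_map_mul_left]
      congr 1
      · simp
      · refine congrArg List.sum (List.map_congr_left fun i _ => ?_)
        simp only [Function.comp_apply, pow_succ]
        rw [show off + i.succ = off + 1 + i from by omega]
        ring
    have hmap : ((List.range (m + 1)).map (· + off))
        = off :: ((List.range m).map (· + (off + 1))) := by
      rw [List.range_succ_eq_map]
      simp only [List.map_cons, List.map_map]
      congr 1
      · simp
      · congr 1
        funext i
        simp [Function.comp, Nat.succ_eq_add_one]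
        omega
    have h0 := hb 0 (by omega)
    simp only [Nat.add_zero] at h0
    set R : Int := ((List.range m).map (fun (i : Nat) => d (off + 1 + i) * base ^ i)).sum with hR
    have hmod : PySem.Int.mod t base = d off := by
      rw [PySem.Int.mod_eq_emod_of_pos hbase, hrest, Int.add_mul_emod_self_left,
        Int.emod_eq_of_lt h0.1 h0.2]
    have hdiv : PySem.Int.floordiv t base = R := by
      rw [PySem.Int.floordiv_eq_ediv_of_pos hbase, hrest,
        Int.add_mul_ediv_left _ _ (ne_of_gt hbase), Int.ediv_eq_zero_of_lt h0.1 h0.2, zero_add]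
    rw [hmap]
    simp only [List.foldl_cons, hmod, hdiv]
    exact ih (off + 1) d _ R (fun i hi => by
        have := hb (1 + i) (by omega)
        constructor <;> [exact (by rw [show off + 1 + i = off + (1 + i) by omega]; exact this.1);
          exact (by rw [show off + 1 + i = off + (1 + i) by omega]; exact this.2)]) rfl

-- ===== VERDICT (by name: the statement is the Claim_ definition above) =====
theorem returnUniqueElemnt_spec : Claim_equal_returnUniqueElemnt := by
  intro arr k _ _
  unfold Spec_returnUniqueElemnt returnUniqueElemnt returnUniqueElemnt_alt
  cases hm : PySem.List.max? arr (fun x => x) with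
  | none => rfl
  | some maxNum =>
    simp only []
    set mb := PySem.Int.bitLength maxNum with hmb
    set base : Int := (arr.length : Int) + 1 with hbase
    have hbpos : 0 < base := by rw [hbase]; positivity
    rw [encode_outer, sum_swap, zero_add]
    have hdec := decode_fold k base hbpos mb 0
      (fun i => (arr.map (fun (num : Int) => PySem.Int.band (num >>> i) 1)).sum) 0
      (((List.range mb).map (fun (i : Nat) =>
        (arr.map (fun (num : Int) => PySem.Int.band (num >>> i) 1)).sum * base ^ i)).sum)
      (fun i _ => by
        have h := digit_bounds arr i
        simp only [Nat.zero_add]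
        exact ⟨h.1, by omega⟩)
      (by simp)
    simp only [Nat.add_zero, List.map_id'] at hdec
    rw [hdec]
    apply PySem.List.foldl_congr_mem
    intro ans bit hbit
    rw [count_fold_eq_sum]
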